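-- pv_equiv track=rewrite | github.com/nivasvand/archetype-analysis | pom_basic_information/read_file.py | compare_plugin_list
-- ===== SOURCE A (Python) =====
-- def compare_plugin_list(plugin_list1, plugin_list2, diff_tag_dic):
--     plugin_del_flag = True
--     plugin_add_flag = True
--     if len(plugin_list1) > 0 and len(plugin_list2) > 0:
--         for plugin1 in plugin_list1:
--             for plugin2 in plugin_list2:
--                 if plugin1[0] == plugin2[0]:
--                     plugin_del_flag = False
--                     if plugin1[1] != plugin2[1]:
--                         diff_tag_dic["plugin_version_change"] += 1
--                     elif plugin1[2] != plugin2[2]: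
--                         diff_tag_dic["plugin_dependency_change"] += 1
--             if plugin_del_flag:
--                 diff_tag_dic["plugin_del"] += 1
--             plugin_del_flag = True
--
--         for plugin2 in plugin_list2:
--             for plugin1 in plugin_list1:
--                 if plugin1[0] == plugin2[0]:
--                     plugin_add_flag = False
--             if plugin_add_flag:
--                 diff_tag_dic["plugin_add"] += 1
--             plugin_add_flag = True
--
--     return diff_tag_dic
-- ===== SOURCE B (Python) =====
-- def compare_plugin_list(plugin_list1, plugin_list2, diff_tag_dic):
--     if plugin_list1 and plugin_list2:
--         index = {}
--         for plugin2 in plugin_list2: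
--             index.setdefault(plugin2[0], []).append(plugin2)
--         keys1 = {plugin1[0] for plugin1 in plugin_list1}
--         for plugin1 in plugin_list1:
--             matches = index.get(plugin1[0])
--             if matches is None:
--                 diff_tag_dic["plugin_del"] += 1
--             else:
--                 for plugin2 in matches:
--                     if plugin1[1] != plugin2[1]:
--                         diff_tag_dic["plugin_version_change"] += 1
--                     elif plugin1[2] != plugin2[2]:
--                         diff_tag_dic["plugin_dependency_change"] += 1
--         for plugin2 in plugin_list2:
--             if plugin2[0] not in keys1:
--                 diff_tag_dic["plugin_add"] += 1
--     return diff_tag_dic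
-- ===== Notes on version B (the rewrite author's own statement) =====
-- stated objective: alternative
-- what changed: Instead of A's two nested scans over plugin_list1 x plugin_list2, B builds a hash index of plugin_list2 grouped by plugin id and a set of plugin_list1 ids once, then finds each plugin's matches by direct lookup.
import Mathlib
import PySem

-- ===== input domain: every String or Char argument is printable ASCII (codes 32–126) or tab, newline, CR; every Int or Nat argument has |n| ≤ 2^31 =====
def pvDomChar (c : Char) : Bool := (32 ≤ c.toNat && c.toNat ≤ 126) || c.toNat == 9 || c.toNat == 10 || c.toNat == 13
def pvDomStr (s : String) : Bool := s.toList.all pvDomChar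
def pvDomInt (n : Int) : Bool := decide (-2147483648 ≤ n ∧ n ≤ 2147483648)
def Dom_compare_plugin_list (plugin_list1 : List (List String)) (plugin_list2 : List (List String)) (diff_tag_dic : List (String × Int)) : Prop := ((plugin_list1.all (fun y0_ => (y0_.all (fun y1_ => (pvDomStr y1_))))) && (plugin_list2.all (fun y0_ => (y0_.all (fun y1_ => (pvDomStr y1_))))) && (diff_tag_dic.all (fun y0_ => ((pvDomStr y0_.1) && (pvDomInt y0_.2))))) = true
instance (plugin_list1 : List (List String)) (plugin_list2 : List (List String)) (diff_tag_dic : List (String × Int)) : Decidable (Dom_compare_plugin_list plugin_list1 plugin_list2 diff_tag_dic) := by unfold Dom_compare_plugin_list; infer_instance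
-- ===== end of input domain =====

-- B replaces A's two nested scans over plugin_list1 x plugin_list2 by a hash index of
-- plugin_list2 grouped by plugin id plus a set of plugin_list1 ids, built once (objective:
-- alternative; not measured faster on the generated inputs).
-- Both programs mutate diff_tag_dic in place in Python (A and B perform the same mutation);
-- the equivalence below is about the returned dict value.

-- Shared accessor/update helpers (the same Python expressions occur verbatim in A and in B):
-- p[0], p[1], p[2] — exact under Pre_ (the element is long enough wherever the access happens);
def pvHd (p : List String) : String := p.headD ""
def pvG1 (p : List String) : String := (p[1]?).getD ""
def pvG2 (p : List String) : String := (p[2]?).getD ""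
-- d[k] += 1 — exact under Pre_ (the key is present wherever the increment happens).
def pvInc (d : PySem.Dict String Int) (k : String) : PySem.Dict String Int :=
  d.modify k 0 (· + 1)
-- the shared two-branch body 'if plugin1[1] != plugin2[1]: … elif plugin1[2] != plugin2[2]: …'
def pvPairUpd (p1 : List String) (d : PySem.Dict String Int) (p2 : List String) : PySem.Dict String Int :=
  if pvG1 p1 ≠ pvG1 p2 then pvInc d "plugin_version_change"
  else if pvG2 p1 ≠ pvG2 p2 then pvInc d "plugin_dependency_change"
  else d

-- ===== PORT A =====
def compare_plugin_list (plugin_list1 : List (List String)) (plugin_list2 : List (List String)) (diff_tag_dic : List (String × Int)) : List (String × Int) :=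
  if plugin_list1.length > 0 ∧ plugin_list2.length > 0 then
    -- first loop: plugin_del_flag threaded through the inner scan of plugin_list2
    let d1 := plugin_list1.foldl (fun d p1 =>
      let st := plugin_list2.foldl (fun (st : Bool × PySem.Dict String Int) p2 =>
        if pvHd p1 = pvHd p2 then (false, pvPairUpd p1 st.2 p2) else st) (true, d)
      if st.1 then pvInc st.2 "plugin_del" else st.2) (PySem.Dict.mk diff_tag_dic)
    -- second loop: plugin_add_flag via the inner scan of plugin_list1
    let d2 := plugin_list2.foldl (fun d p2 =>
      let flag := plugin_list1.foldl (fun flag p1 => if pvHd p1 = pvHd p2 then false else flag) true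
      if flag then pvInc d "plugin_add" else d) d1
    d2.items
  else diff_tag_dic

-- ===== PORT B =====
-- index.setdefault(p2[0], []).append(p2)
def pvIndex (plugin_list2 : List (List String)) : PySem.Dict String (List (List String)) :=
  plugin_list2.foldl (fun idx p2 => idx.modify (pvHd p2) [] (· ++ [p2])) (PySem.Dict.mk [])

def compare_plugin_list_alt (plugin_list1 : List (List String)) (plugin_list2 : List (List String)) (diff_tag_dic : List (String × Int)) : List (String × Int) :=
  if plugin_list1 ≠ [] ∧ plugin_list2 ≠ [] then
    let idx := pvIndex plugin_list2
    let keys1 : PySem.Set String := PySem.Set.ofList (plugin_list1.map pvHd)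
    let d1 := plugin_list1.foldl (fun d p1 =>
      match idx.get? (pvHd p1) with
      | none => pvInc d "plugin_del"
      | some ms => ms.foldl (pvPairUpd p1) d) (PySem.Dict.mk diff_tag_dic)
    let d2 := plugin_list2.foldl (fun d p2 =>
      if pvHd p2 ∈ keys1 then d else pvInc d "plugin_add") d1
    d2.items
  else diff_tag_dic

-- ===== PRECONDITION & SPEC =====
-- Pre_ is exactly where Python A returns: with both lists nonempty every element needs an id p[0];
-- a key-matched pair needs p[1] (and p[2] when the versions agree) on both sides, else IndexError;
-- and each of the four counter keys must be present in diff_tag_dic iff some pair/element actually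
-- triggers its increment, else KeyError.
def Pre_compare_plugin_list (plugin_list1 : List (List String)) (plugin_list2 : List (List String)) (diff_tag_dic : List (String × Int)) : Prop :=
  plugin_list1 = [] ∨ plugin_list2 = [] ∨
  ((∀ p ∈ plugin_list1, p ≠ []) ∧ (∀ p ∈ plugin_list2, p ≠ []) ∧
   (∀ p1 ∈ plugin_list1, ∀ p2 ∈ plugin_list2, p1.head? = p2.head? →
      2 ≤ p1.length ∧ 2 ≤ p2.length ∧ (p1[1]? = p2[1]? → 3 ≤ p1.length ∧ 3 ≤ p2.length)) ∧
   ((∃ p1 ∈ plugin_list1, ∃ p2 ∈ plugin_list2, p1.head? = p2.head? ∧ p1[1]? ≠ p2[1]?) →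
      "plugin_version_change" ∈ diff_tag_dic.map Prod.fst) ∧
   ((∃ p1 ∈ plugin_list1, ∃ p2 ∈ plugin_list2, p1.head? = p2.head? ∧ p1[1]? = p2[1]? ∧ p1[2]? ≠ p2[2]?) →
      "plugin_dependency_change" ∈ diff_tag_dic.map Prod.fst) ∧
   ((∃ p1 ∈ plugin_list1, ∀ p2 ∈ plugin_list2, p1.head? ≠ p2.head?) →
      "plugin_del" ∈ diff_tag_dic.map Prod.fst) ∧
   ((∃ p2 ∈ plugin_list2, ∀ p1 ∈ plugin_list1, p1.head? ≠ p2.head?) →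
      "plugin_add" ∈ diff_tag_dic.map Prod.fst))
instance (plugin_list1 : List (List String)) (plugin_list2 : List (List String)) (diff_tag_dic : List (String × Int)) : Decidable (Pre_compare_plugin_list plugin_list1 plugin_list2 diff_tag_dic) := by unfold Pre_compare_plugin_list; infer_instance

def pvWitness_compare_plugin_list : List (List String) × List (List String) × (List (String × Int)) :=
  ([["a", "1", "x"]], [["a", "1", "x"], ["b", "2", "y"]], [("plugin_add", 3)])

def Spec_compare_plugin_list (plugin_list1 : List (List String)) (plugin_list2 : List (List String)) (diff_tag_dic : List (String × Int)) (out : List (String × Int)) : Prop := out = compare_plugin_list_alt plugin_list1 plugin_list2 diff_tag_dic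
instance (plugin_list1 : List (List String)) (plugin_list2 : List (List String)) (diff_tag_dic : List (String × Int)) (out : List (String × Int)) : Decidable (Spec_compare_plugin_list plugin_list1 plugin_list2 diff_tag_dic out) := by unfold Spec_compare_plugin_list; infer_instance

-- ===== CLAIM (what is proved, stated in full; the proofs are below) =====
def Claim_equal_compare_plugin_list : Prop := ∀ (plugin_list1 : List (List String)) (plugin_list2 : List (List String)) (diff_tag_dic : List (String × Int)), Dom_compare_plugin_list plugin_list1 plugin_list2 diff_tag_dic → Pre_compare_plugin_list plugin_list1 plugin_list2 diff_tag_dic → Spec_compare_plugin_list plugin_list1 plugin_list2 diff_tag_dic (compare_plugin_list plugin_list1 plugin_list2 diff_tag_dic)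

-- ===== LEMMAS AND PROOFS =====

theorem pvWitness_ok :
    Dom_compare_plugin_list pvWitness_compare_plugin_list.1 pvWitness_compare_plugin_list.2.1 pvWitness_compare_plugin_list.2.2 ∧
    Pre_compare_plugin_list pvWitness_compare_plugin_list.1 pvWitness_compare_plugin_list.2.1 pvWitness_compare_plugin_list.2.2 := by
  decide

-- the index built by B groups plugin_list2 by id, keeping order
theorem pvIndex_getD (l2 : List (List String)) (idx : PySem.Dict String (List (List String))) (k : String) :
    (l2.foldl (fun idx p2 => idx.modify (pvHd p2) [] (· ++ [p2])) idx).getD k [] =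
      idx.getD k [] ++ l2.filter (fun p2 => pvHd p2 = k) := by
  induction l2 generalizing idx with
  | nil => simp
  | cons p t ih =>
    simp only [List.foldl_cons, ih, List.filter_cons]
    rw [PySem.Dict.getD_modify]
    by_cases h : pvHd p = k
    · simp [h, List.append_assoc]
    · simp [h, Ne.symm h]

theorem pvIndex_contains (l2 : List (List String)) (idx : PySem.Dict String (List (List String))) (k : String) :
    (l2.foldl (fun idx p2 => idx.modify (pvHd p2) [] (· ++ [p2])) idx).contains k =
      (idx.contains k || l2.any (fun p2 => pvHd p2 = k)) := by
  induction l2 generalizing idx with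
  | nil => simp
  | cons p t ih =>
    simp only [List.foldl_cons, ih, List.any_cons, PySem.Dict.contains_modify]
    by_cases h : pvHd p = k
    · simp [h]
    · have hb : (k == pvHd p) = false := by simpa [beq_iff_eq] using Ne.symm h
      simp [hb, h]

theorem pvIndex_get? (l2 : List (List String)) (k : String) :
    (pvIndex l2).get? k =
      if l2.filter (fun p2 => pvHd p2 = k) = [] then none
      else some (l2.filter (fun p2 => pvHd p2 = k)) := by
  have hc : (pvIndex l2).contains k = l2.any (fun p2 => pvHd p2 = k) := by
    simpa using pvIndex_contains l2 (PySem.Dict.mk []) k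
  have hd : (pvIndex l2).getD k [] = l2.filter (fun p2 => pvHd p2 = k) := by
    simpa using pvIndex_getD l2 (PySem.Dict.mk []) k
  by_cases h : l2.filter (fun p2 => pvHd p2 = k) = []
  · have hcf : (pvIndex l2).contains k = false := by
      rw [hc]; simpa [List.filter_eq_nil_iff] using (List.filter_eq_nil_iff.1 h)
    simp [h, (PySem.Dict.get?_eq_none_iff_contains (pvIndex l2) k).2 hcf]
  · have hne : l2.any (fun p2 => pvHd p2 = k) = true := by
      rcases List.exists_mem_of_ne_nil _ h with ⟨p, hp⟩
      rcases List.mem_filter.1 hp with ⟨hpm, hpk⟩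
      exact List.any_eq_true.2 ⟨p, hpm, hpk⟩
    have hct : (pvIndex l2).contains k = true := by rw [hc, hne]
    have hs : ((pvIndex l2).get? k).isSome = true := by
      rw [← PySem.Dict.contains_eq_isSome_get?]; exact hct
    rcases Option.isSome_iff_exists.1 hs with ⟨v, hv⟩
    have hvv : v = l2.filter (fun p2 => pvHd p2 = k) := by
      rw [← hd, PySem.Dict.getD_eq_get?_getD, hv]; rfl
    simp [h, hv, hvv]

-- A's inner scan of plugin_list2 ≡ flag plus a fold over the key-matched sublist
theorem innerA_eq (p1 : List String) (l2 : List (List String)) (b : Bool) (d : PySem.Dict String Int) :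
    l2.foldl (fun (st : Bool × PySem.Dict String Int) p2 =>
        if pvHd p1 = pvHd p2 then (false, pvPairUpd p1 st.2 p2) else st) (b, d) =
      (b && !(l2.any (fun p2 => pvHd p2 = pvHd p1)),
       (l2.filter (fun p2 => pvHd p2 = pvHd p1)).foldl (pvPairUpd p1) d) := by
  induction l2 generalizing b d with
  | nil => simp
  | cons p t ih =>
    simp only [List.foldl_cons]
    by_cases h : pvHd p1 = pvHd p
    · rw [if_pos h, ih]
      simp [List.any_cons, h.symm]
    · rw [if_neg h, ih]
      simp [List.any_cons, Ne.symm h]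

-- A's per-element first-loop step equals B's (index lookup instead of a scan)
theorem stepA_eq_stepB (l2 : List (List String)) (p1 : List String) (d : PySem.Dict String Int) :
    (let st := l2.foldl (fun (st : Bool × PySem.Dict String Int) p2 =>
        if pvHd p1 = pvHd p2 then (false, pvPairUpd p1 st.2 p2) else st) (true, d)
     if st.1 then pvInc st.2 "plugin_del" else st.2) =
      (match (pvIndex l2).get? (pvHd p1) with
       | none => pvInc d "plugin_del"
       | some ms => ms.foldl (pvPairUpd p1) d) := by
  show (if _ then _ else _) = _
  rw [innerA_eq, pvIndex_get? l2 (pvHd p1)]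
  by_cases h : l2.filter (fun p2 => pvHd p2 = pvHd p1) = []
  · have ha : l2.any (fun p2 => pvHd p2 = pvHd p1) = false := by
      simpa [List.filter_eq_nil_iff] using (List.filter_eq_nil_iff.1 h)
    simp [h, ha]
  · have ha : l2.any (fun p2 => pvHd p2 = pvHd p1) = true := by
      rcases List.exists_mem_of_ne_nil _ h with ⟨p, hp⟩
      rcases List.mem_filter.1 hp with ⟨hpm, hpk⟩
      exact List.any_eq_true.2 ⟨p, hpm, hpk⟩
    simp [h, ha]

-- A's second-loop flag scan ≡ membership in B's id set
theorem addFlag_eq (l1 : List (List String)) (p2 : List String) :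
    l1.foldl (fun flag p1 => if pvHd p1 = pvHd p2 then false else flag) true =
      !decide (pvHd p2 ∈ (PySem.Set.ofList (l1.map pvHd) : PySem.Set String)) := by
  rw [PySem.List.foldl_ite_false_eq (fun p1 => pvHd p1 = pvHd p2)]
  simp [PySem.Set.mem_ofList, eq_comm, ← List.decide_exists_mem]

-- ===== VERDICT (by name: the statement is the Claim_ definition above) =====
theorem compare_plugin_list_spec : Claim_equal_compare_plugin_list := by
  intro l1 l2 d _ _
  unfold Spec_compare_plugin_list compare_plugin_list compare_plugin_list_alt
  rcases l1 with _ | ⟨p, t⟩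
  · simp
  rcases l2 with _ | ⟨q, s⟩
  · simp
  rw [if_pos (by constructor <;> simp), if_pos (by constructor <;> simp)]
  have h1 : (fun (d : PySem.Dict String Int) p1 =>
      let st := (q :: s).foldl (fun (st : Bool × PySem.Dict String Int) p2 =>
        if pvHd p1 = pvHd p2 then (false, pvPairUpd p1 st.2 p2) else st) (true, d)
      if st.1 then pvInc st.2 "plugin_del" else st.2) =
      (fun (d : PySem.Dict String Int) p1 =>
        match (pvIndex (q :: s)).get? (pvHd p1) with
        | none => pvInc d "plugin_del"
        | some ms => ms.foldl (pvPairUpd p1) d) :=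
    funext fun d => funext fun p1 => stepA_eq_stepB (q :: s) p1 d
  have h2 : (fun (d : PySem.Dict String Int) p2 =>
      let flag := (p :: t).foldl (fun flag p1 => if pvHd p1 = pvHd p2 then false else flag) true
      if flag then pvInc d "plugin_add" else d) =
      (fun (d : PySem.Dict String Int) p2 =>
        if pvHd p2 ∈ (PySem.Set.ofList ((p :: t).map pvHd) : PySem.Set String) then d
        else pvInc d "plugin_add") := by
    funext d p2
    show (if _ then _ else _) = _
    rw [addFlag_eq]
    by_cases hm : pvHd p2 ∈ (PySem.Set.ofList ((p :: t).map pvHd) : PySem.Set String)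
    · rw [decide_eq_true hm]
      simp only [Bool.not_true, Bool.false_eq_true, if_false, if_pos hm]
    · rw [decide_eq_false hm]
      simp only [Bool.not_false, if_true, if_neg hm]
  simp only [h1, h2]
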